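-- pv_equiv track=rewrite | github.com/angrymeir/Enterprise-Driven-OSS-Case-Study-Security-Automation | 04.analysis/RQ3/02.languages.py | act_per_project
-- ===== SOURCE A (Python) =====
-- from collections import defaultdict
--
-- def act_per_project(sec, sec_patterns):
--     """
--     Map security activities to project.
--
--     :param sec: mapping of projects to security tools
--     :param sec_patterns: mapping of security activities to security tools
--     :return: dict, mapping projects to security activities.
--     """
--     mapping = defaultdict(set)
--     for proj, tools in sec.items():
--         for tool in tools:
--             for activity, ts in sec_patterns.items():
--                 if tool in ts:
--                     mapping[proj].add(activity)
--         if not len(tools):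
--             mapping[proj].add("No Security")
--     return mapping
-- ===== SOURCE B (Python) =====
-- from collections import defaultdict
--
-- def act_per_project(sec, sec_patterns):
--     # Inverse index: tool -> activities (each activity once per tool, in sec_patterns order)
--     index = {}
--     for activity, ts in sec_patterns.items():
--         for tool in dict.fromkeys(ts):
--             index.setdefault(tool, []).append(activity)
--     mapping = defaultdict(set)
--     for proj, tools in sec.items():
--         acts = [a for t in tools for a in index.get(t, [])] if tools else ["No Security"]
--         if acts:
--             mapping[proj].update(acts)
--     return mapping
-- ===== Notes on version B (the rewrite author's own statement) =====
-- stated objective: faster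
-- what changed: Instead of scanning every (activity, tools) pattern for every tool of every project, B precomputes an inverse index tool->activities once and then maps each project's tools through single index lookups, adding all matched activities in one bulk set update.
import Mathlib
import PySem

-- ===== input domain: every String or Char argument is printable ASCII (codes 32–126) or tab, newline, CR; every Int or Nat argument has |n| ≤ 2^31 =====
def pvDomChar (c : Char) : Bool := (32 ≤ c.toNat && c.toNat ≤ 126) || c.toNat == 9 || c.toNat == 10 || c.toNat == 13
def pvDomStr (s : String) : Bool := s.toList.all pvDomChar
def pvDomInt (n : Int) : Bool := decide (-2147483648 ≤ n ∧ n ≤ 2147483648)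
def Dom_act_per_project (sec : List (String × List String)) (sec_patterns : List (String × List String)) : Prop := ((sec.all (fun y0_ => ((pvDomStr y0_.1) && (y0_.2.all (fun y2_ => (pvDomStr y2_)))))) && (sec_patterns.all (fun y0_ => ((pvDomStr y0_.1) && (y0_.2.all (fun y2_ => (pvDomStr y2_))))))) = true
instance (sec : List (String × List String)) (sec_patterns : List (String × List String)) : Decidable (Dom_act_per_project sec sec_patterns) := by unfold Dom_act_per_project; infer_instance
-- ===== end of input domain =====

-- B replaces A's per-(project,tool) scan of all activity patterns by a precomputed inverse index tool → activities, looked up once per tool.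

-- ===== PORT A =====
def act_per_project (sec : List (String × List String)) (sec_patterns : List (String × List String)) : List (String × List String) :=
  let secD := PySem.Dict.ofList sec
  let patD := PySem.Dict.ofList sec_patterns
  let mapping := secD.items.foldl (fun (m : PySem.Dict String (PySem.Set String)) pt =>
    let m1 := pt.2.foldl (fun m tool =>
      patD.items.foldl (fun m av =>
        if av.2.contains tool then m.modify pt.1 PySem.Set.empty (fun s => PySem.Set.add s av.1) else m) m) m
    if pt.2.length = 0 then m1.modify pt.1 PySem.Set.empty (fun s => PySem.Set.add s "No Security") else m1)
    PySem.Dict.empty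
  mapping.items

-- ===== PORT B =====
def act_per_project_alt (sec : List (String × List String)) (sec_patterns : List (String × List String)) : List (String × List String) :=
  let patD := PySem.Dict.ofList sec_patterns
  let index := patD.items.foldl (fun (d : PySem.Dict String (List String)) av =>
      (PySem.List.dedup av.2).foldl (fun d tool => d.modify tool [] (fun l => l ++ [av.1])) d)
    PySem.Dict.empty
  let mapping := (PySem.Dict.ofList sec).items.foldl (fun (m : PySem.Dict String (PySem.Set String)) pt =>
      let acts := if pt.2.isEmpty then ["No Security"] else pt.2.flatMap (fun t => index.getD t [])
      if acts.isEmpty then m else m.modify pt.1 PySem.Set.empty (fun s => PySem.Set.update s acts))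
    PySem.Dict.empty
  mapping.items

-- ===== PRECONDITION & SPEC =====
def Spec_act_per_project (sec : List (String × List String)) (sec_patterns : List (String × List String)) (out : List (String × List String)) : Prop := out = act_per_project_alt sec sec_patterns
instance (sec : List (String × List String)) (sec_patterns : List (String × List String)) (out : List (String × List String)) : Decidable (Spec_act_per_project sec sec_patterns out) := by unfold Spec_act_per_project; infer_instance

-- ===== CLAIM (what is proved, stated in full; the proofs are below) =====
def Claim_equal_act_per_project : Prop := ∀ (sec : List (String × List String)) (sec_patterns : List (String × List String)), Dom_act_per_project sec sec_patterns → Spec_act_per_project sec sec_patterns (act_per_project sec sec_patterns)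

-- ===== LEMMAS AND PROOFS =====

theorem foldl_flatMap_eq {α β δ : Type} (g : α → List β) (f : δ → β → δ) (l : List α) (i : δ) :
    List.foldl f i (l.flatMap g) = List.foldl (fun acc x => List.foldl f acc (g x)) i l := by
  induction l generalizing i with
  | nil => rfl
  | cons a l ih => simp [List.flatMap_cons, List.foldl_append, ih]

theorem modify_modify_self {κ ν : Type} [BEq κ] [LawfulBEq κ] (d : PySem.Dict κ ν) (k : κ) (d0 : ν) (f g : ν → ν) :
    (d.modify k d0 f).modify k d0 g = d.modify k d0 (fun v => g (f v)) := by
  simp [PySem.Dict.modify, PySem.Dict.getD_insert_self, PySem.Dict.insert_insert_self]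

theorem foldl_modify_add {κ α : Type} [BEq κ] [LawfulBEq κ] [BEq α] (k : κ) (d0 : PySem.Set α)
    (acts : List α) (m : PySem.Dict κ (PySem.Set α)) :
    List.foldl (fun m a => m.modify k d0 (fun s => PySem.Set.add s a)) m acts =
      if acts.isEmpty then m else m.modify k d0 (fun s => PySem.Set.update s acts) := by
  induction acts generalizing m with
  | nil => rfl
  | cons a rest ih =>
    rw [List.foldl_cons, ih]
    cases rest with
    | nil => simp [PySem.Set.update_cons, PySem.Set.update_nil]
    | cons b r =>
      simp [modify_modify_self, PySem.Set.update_cons]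

theorem dedup_filter_beq {α : Type} [BEq α] [LawfulBEq α] (ts : List α) (t : α) :
    (PySem.List.dedup ts).filter (fun x => x == t) = if ts.contains t then [t] else [] := by
  rw [List.filter_beq]
  by_cases h : t ∈ ts
  · rw [List.count_eq_one_of_mem (PySem.List.nodup_dedup ts) ((PySem.List.mem_dedup ts t).mpr h)]
    simp [h]
  · rw [List.count_eq_zero.mpr (fun hm => h ((PySem.List.mem_dedup ts t).mp hm))]
    simp [h]

theorem getD_index (pat : List (String × List String)) (t : String) :
    (List.foldl (fun (d : PySem.Dict String (List String)) av =>
        List.foldl (fun d tool => d.modify tool [] (fun l => l ++ [av.1])) d (PySem.List.dedup av.2))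
      PySem.Dict.empty pat).getD t []
    = (pat.filter (fun av => av.2.contains t)).map (fun av => av.1) := by
  induction pat using List.reverseRecOn with
  | nil => simp [PySem.Dict.getD_empty]
  | append_singleton rest av ih =>
    rw [List.foldl_append, List.foldl_cons, List.foldl_nil]
    rw [show List.foldl (fun d tool => d.modify tool [] (fun l => l ++ [av.1]))
          (List.foldl (fun (d : PySem.Dict String (List String)) av =>
            List.foldl (fun d tool => d.modify tool [] (fun l => l ++ [av.1])) d (PySem.List.dedup av.2))
            PySem.Dict.empty rest) (PySem.List.dedup av.2)
        = List.foldl (fun d p => d.modify p.1 [] (fun l => l ++ [p.2]))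
            (List.foldl (fun (d : PySem.Dict String (List String)) av =>
              List.foldl (fun d tool => d.modify tool [] (fun l => l ++ [av.1])) d (PySem.List.dedup av.2))
              PySem.Dict.empty rest)
            ((PySem.List.dedup av.2).map (fun tool => (tool, av.1)))
      from (List.foldl_map (f := fun tool => (tool, av.1)) (g := fun (d : PySem.Dict String (List String)) (p : String × String) => d.modify p.1 [] fun l => l ++ [p.2])).symm]
    rw [PySem.Dict.getD_foldl_modify_append, ih, List.filter_append, List.map_append]
    congr 1
    rw [List.filter_map]
    have : ((fun (p : String × String) => p.1 == t) ∘ (fun tool => (tool, av.1))) = (fun x => x == t) := rfl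
    rw [this, dedup_filter_beq]
    by_cases h : t ∈ av.2
    · simp [h]
    · simp [h]

-- ===== VERDICT (by name: the statement is the Claim_ definition above) =====
theorem act_per_project_spec : Claim_equal_act_per_project := by
  intro sec sec_patterns _
  unfold Spec_act_per_project
  dsimp only [act_per_project, act_per_project_alt]
  refine congrArg PySem.Dict.items ?_
  refine PySem.List.foldl_congr_mem _ _ _ _ ?_
  intro m pt _
  by_cases h : pt.2 = []
  · simp [h, PySem.Set.update_cons, PySem.Set.update_nil]
  · have hlen : ¬ pt.2.length = 0 := by simpa [List.length_eq_zero_iff] using h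
    have hemp : pt.2.isEmpty = false := by simp [h]
    rw [if_neg hlen]
    simp only [hemp, Bool.false_eq_true, if_false]
    have hg : ∀ (m : PySem.Dict String (PySem.Set String)) (tool : String),
        List.foldl (fun m av =>
            if av.2.contains tool then m.modify pt.1 PySem.Set.empty (fun s => PySem.Set.add s av.1) else m)
          m (PySem.Dict.ofList sec_patterns).items
        = List.foldl (fun m a => m.modify pt.1 PySem.Set.empty (fun s => PySem.Set.add s a)) m
            ((List.foldl (fun (d : PySem.Dict String (List String)) av =>
                List.foldl (fun d tool => d.modify tool [] (fun l => l ++ [av.1])) d (PySem.List.dedup av.2))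
              PySem.Dict.empty (PySem.Dict.ofList sec_patterns).items).getD tool []) := by
      intro m tool
      rw [PySem.List.foldl_if_eq_foldl_filter, getD_index, List.foldl_map]
    rw [PySem.List.foldl_congr_mem _ _
        (fun m tool => List.foldl (fun m a => m.modify pt.1 PySem.Set.empty (fun s => PySem.Set.add s a)) m
            ((List.foldl (fun (d : PySem.Dict String (List String)) av =>
                List.foldl (fun d tool => d.modify tool [] (fun l => l ++ [av.1])) d (PySem.List.dedup av.2))
              PySem.Dict.empty (PySem.Dict.ofList sec_patterns).items).getD tool []))
        m (fun acc x _ => hg acc x)]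
    rw [← foldl_flatMap_eq]
    rw [foldl_modify_add]
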